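-- pv_equiv track=rewrite | github.com/HTF1125/investment-x | ix/core/regimes/compose.py | _has_state_collision
-- ===== SOURCE A (Python) =====
-- def _has_state_collision(state_lists: list[list[str]]) -> bool:
--     """True if any state name appears in 2+ input regimes.
--
--     Used to decide whether to disambiguate joint state names with regime
--     key prefixes. Credit's "Expansion" (tight spreads) and growth's
--     "Expansion" (GDP rising) collide and need disambiguation.
--     """
--     seen: set[str] = set()
--     for sl in state_lists:
--         for name in sl:
--             if name in seen:
--                 return True
--             seen.add(name)
--     return False
-- ===== SOURCE B (Python) =====
-- def _has_state_collision(state_lists: list[list[str]]) -> bool: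
--     """True if any state name appears in 2+ input regimes.
--
--     Counting formulation: duplicates exist iff the flattened name count
--     exceeds the number of distinct names.
--     """
--     total = sum(len(sl) for sl in state_lists)
--     distinct = {name for sl in state_lists for name in sl}
--     return total != len(distinct)
-- ===== Notes on version B (the rewrite author's own statement) =====
-- stated objective: simpler
-- what changed: Replaces the incremental seen-set with early return by a single counting comparison: total number of names vs. number of distinct names over the flattened input.
import Mathlib
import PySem

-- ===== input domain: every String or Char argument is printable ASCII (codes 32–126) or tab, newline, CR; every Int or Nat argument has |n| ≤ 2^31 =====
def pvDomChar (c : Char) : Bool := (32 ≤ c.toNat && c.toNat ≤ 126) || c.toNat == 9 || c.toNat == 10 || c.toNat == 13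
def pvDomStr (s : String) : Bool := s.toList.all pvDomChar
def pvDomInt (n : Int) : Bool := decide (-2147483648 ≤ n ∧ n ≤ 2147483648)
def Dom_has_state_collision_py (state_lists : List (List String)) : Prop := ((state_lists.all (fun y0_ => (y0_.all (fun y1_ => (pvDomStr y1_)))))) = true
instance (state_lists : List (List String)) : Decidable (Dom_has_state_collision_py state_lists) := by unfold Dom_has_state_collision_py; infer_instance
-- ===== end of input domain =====

-- B replaces A's incremental seen-set with early return by one counting comparison
-- (total names vs. distinct names over the flattened input) — objective: simpler.


-- ===== PORT A =====
-- inner 'for name in sl' loop: none = the function returned True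
def hscInner (seen : PySem.Set String) : List String → Option (PySem.Set String)
  | [] => some seen
  | name :: rest =>
      if PySem.Set.contains seen name then none
      else hscInner (PySem.Set.add seen name) rest

-- outer 'for sl in state_lists' loop
def hscOuter (seen : PySem.Set String) : List (List String) → Bool
  | [] => false
  | sl :: rest =>
      match hscInner seen sl with
      | none => true
      | some seen' => hscOuter seen' rest

def has_state_collision_py (state_lists : List (List String)) : Bool :=
  hscOuter PySem.Set.empty state_lists

-- ===== PORT B =====
def has_state_collision_py_alt (state_lists : List (List String)) : Bool :=
  let total : Int := (state_lists.map (fun sl => (sl.length : Int))).sum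
  let distinct : PySem.Set String := PySem.Set.ofList (state_lists.flatMap id)
  total != PySem.Set.len distinct

-- ===== PRECONDITION & SPEC =====
def Spec_has_state_collision_py (state_lists : List (List String)) (out : Bool) : Prop := out = has_state_collision_py_alt state_lists
instance (state_lists : List (List String)) (out : Bool) : Decidable (Spec_has_state_collision_py state_lists out) := by unfold Spec_has_state_collision_py; infer_instance

-- ===== CLAIM (what is proved, stated in full; the proofs are below) =====
def Claim_equal_has_state_collision_py : Prop := ∀ (state_lists : List (List String)), Dom_has_state_collision_py state_lists → Spec_has_state_collision_py state_lists (has_state_collision_py state_lists)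

-- ===== LEMMAS AND PROOFS =====

-- one-element-at-a-time fusion of A's two nested loops over the flattened list
def hscLoop1 (seen : PySem.Set String) : List String → Bool
  | [] => false
  | x :: xs =>
      if PySem.Set.contains seen x then true else hscLoop1 (PySem.Set.add seen x) xs

theorem hscOuter_eq_loop1 (sls : List (List String)) :
    ∀ seen, hscOuter seen sls = hscLoop1 seen (sls.flatMap id) := by
  induction sls with
  | nil => intro seen; rfl
  | cons sl rest ih =>
      intro seen
      simp only [List.flatMap_cons, id]
      induction sl generalizing seen with
      | nil => simpa [hscOuter, hscInner] using ih seen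
      | cons x xs ihx =>
          simp only [hscOuter, hscInner, List.cons_append, hscLoop1]
          by_cases h : x ∈ seen
          · simp [h]
          · have := ihx (PySem.Set.add seen x)
            simpa [hscOuter, h] using this

-- the loop returns false exactly when every element was fresh on arrival,
-- i.e. folding add grows the set by exactly the list length
theorem update_length_le (xs : List String) :
    ∀ s : PySem.Set String, (xs.foldl PySem.Set.add s).length ≤ s.length + xs.length := by
  induction xs with
  | nil => intro s; simp
  | cons x xs ih =>
      intro s
      have h := ih (PySem.Set.add s x)
      have hadd : (PySem.Set.add s x).length ≤ s.length + 1 := by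
        by_cases hx : x ∈ s <;> simp [PySem.Set.add, hx]
      simp only [List.foldl_cons, List.length_cons]
      omega

theorem loop1_char (xs : List String) :
    ∀ seen : PySem.Set String,
      hscLoop1 seen xs = decide ((xs.foldl PySem.Set.add seen).length ≠ seen.length + xs.length) := by
  induction xs with
  | nil => intro seen; simp [hscLoop1]
  | cons x xs ih =>
      intro seen
      simp only [hscLoop1, List.foldl_cons, List.length_cons]
      by_cases h : x ∈ seen
      · have hadd : PySem.Set.add seen x = seen := by simp [PySem.Set.add, h]
        simp only [hadd]
        have hle := update_length_le xs seen
        have hne : (xs.foldl PySem.Set.add seen).length ≠ seen.length + (xs.length + 1) := by omega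
        simp [h, hne]
      · have hadd : (PySem.Set.add seen x).length = seen.length + 1 := by
          simp [PySem.Set.add, h]
        rw [if_neg (by simp [h]), ih (PySem.Set.add seen x), hadd]
        simp only [decide_eq_decide]
        constructor <;> (intro hne; omega)

theorem natne (a b : Nat) : decide (b ≠ 0 + a) = ((a:Int) != (b:Int)) := by
  by_cases h : b = a
  · subst h; simp
  · have h2 : (a:Int) ≠ (b:Int) := by exact_mod_cast (Ne.symm h)
    simp [h, h2, bne]

theorem hsumL (sls : List (List String)) :
    (sls.map (fun sl => (sl.length : Int))).sum = ((sls.flatMap id).length : Int) := by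
  induction sls with
  | nil => simp
  | cons a t ih => simp [ih]

-- ===== VERDICT (by name: the statement is the Claim_ definition above) =====
theorem has_state_collision_py_spec : Claim_equal_has_state_collision_py := by
  intro sls _
  unfold Spec_has_state_collision_py has_state_collision_py has_state_collision_py_alt
  rw [hscOuter_eq_loop1, loop1_char, PySem.Set.ofList_eq_foldl, hsumL sls]
  simp only [PySem.Set.len, PySem.Set.empty, List.length_nil]
  exact natne _ _
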